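-- pv_equiv track=rewrite | github.com/dan144/advent-of-code | 2016/07.py | find_aba
-- ===== SOURCE A (Python) =====
-- def find_aba(outside, hypernet):
--     for s in outside:
--         for i in range(len(s) - 2):
--             if s[i] == s[i + 2] and s[i] != s[i + 1]:
--                 for h in hypernet:
--                     if s[i + 1] + s[i] + s[i + 1] in h:
--                         return True
--     return False
-- ===== SOURCE B (Python) =====
-- def find_aba(outside, hypernet):
--     babs = {s[i + 1] + s[i] + s[i + 1]
--             for s in outside
--             for i in range(len(s) - 2)
--             if s[i] == s[i + 2] and s[i] != s[i + 1]}
--     windows = {h[j:j + 3] for h in hypernet for j in range(len(h) - 2)}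
--     return not babs.isdisjoint(windows)
-- ===== Notes on version B (the rewrite author's own statement) =====
-- stated objective: alternative
-- what changed: Replaces the early-returning triple-nested scan (each ABA rescanning every hypernet string) by two independent set-building passes (required BAB strings from outside, all length-3 windows of hypernet) followed by a single set-disjointness test.
import Mathlib
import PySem

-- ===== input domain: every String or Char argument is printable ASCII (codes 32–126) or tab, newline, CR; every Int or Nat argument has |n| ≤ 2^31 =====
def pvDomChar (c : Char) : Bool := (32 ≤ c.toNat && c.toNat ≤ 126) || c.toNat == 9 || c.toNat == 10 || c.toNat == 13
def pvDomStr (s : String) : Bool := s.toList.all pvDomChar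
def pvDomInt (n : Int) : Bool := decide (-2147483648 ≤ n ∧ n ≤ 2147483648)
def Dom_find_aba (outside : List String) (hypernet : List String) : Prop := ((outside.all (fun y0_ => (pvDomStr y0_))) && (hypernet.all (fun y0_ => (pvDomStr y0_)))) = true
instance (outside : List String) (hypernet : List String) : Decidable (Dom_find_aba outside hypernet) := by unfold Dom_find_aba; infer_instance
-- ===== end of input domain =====

-- B replaces A's early-returning triple-nested scan by two set-building passes
-- (BAB patterns from `outside`, length-3 windows of `hypernet`) and one disjointness test.


-- ===== PORT A =====
def find_aba (outside : List String) (hypernet : List String) : Bool :=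
  outside.any (fun s =>
    let cs := s.toList
    (List.range (cs.length - 2)).any (fun i =>
      if cs.getD i ' ' == cs.getD (i + 2) ' ' && cs.getD i ' ' != cs.getD (i + 1) ' ' then
        hypernet.any (fun h =>
          PySem.Chars.isIn [cs.getD (i + 1) ' ', cs.getD i ' ', cs.getD (i + 1) ' '] h.toList)
      else false))

-- ===== PORT B =====
def find_aba_alt (outside : List String) (hypernet : List String) : Bool :=
  let babs : PySem.Set (List Char) :=
    outside.foldl (fun acc s =>
      let cs := s.toList
      (List.range (cs.length - 2)).foldl (fun acc2 i =>
        if cs.getD i ' ' == cs.getD (i + 2) ' ' && cs.getD i ' ' != cs.getD (i + 1) ' ' then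
          PySem.Set.add acc2 [cs.getD (i + 1) ' ', cs.getD i ' ', cs.getD (i + 1) ' ']
        else acc2) acc) PySem.Set.empty
  let windows : PySem.Set (List Char) :=
    hypernet.foldl (fun acc h =>
      let hs := h.toList
      (List.range (hs.length - 2)).foldl (fun acc2 j =>
        PySem.Set.add acc2 ((hs.drop j).take 3)) acc) PySem.Set.empty
  !(PySem.Set.isdisjoint babs windows)

-- ===== PRECONDITION & SPEC =====
def Spec_find_aba (outside : List String) (hypernet : List String) (out : Bool) : Prop := out = find_aba_alt outside hypernet
instance (outside : List String) (hypernet : List String) (out : Bool) : Decidable (Spec_find_aba outside hypernet out) := by unfold Spec_find_aba; infer_instance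

-- ===== CLAIM (what is proved, stated in full; the proofs are below) =====
def Claim_equal_find_aba : Prop := ∀ (outside : List String) (hypernet : List String), Dom_find_aba outside hypernet → Spec_find_aba outside hypernet (find_aba outside hypernet)

-- ===== LEMMAS AND PROOFS =====

-- membership in a foldl of conditional Set.add's
theorem mem_foldl_setAdd_if {α β : Type} [BEq β] [LawfulBEq β] (l : List α) (c : α → Bool)
    (g : α → β) (acc : PySem.Set β) (x : β) :
    (x ∈ l.foldl (fun a i => if c i then PySem.Set.add a (g i) else a) acc) ↔
      x ∈ acc ∨ ∃ i ∈ l, c i ∧ x = g i := by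
  induction l generalizing acc with
  | nil => simp
  | cons y ys ih =>
    simp only [List.foldl_cons, ih]
    by_cases h : c y = true
    · simp only [h, if_pos, PySem.Set.mem_add, List.mem_cons]
      constructor
      · rintro ((hx | hx) | ⟨i, hi, hc, hx⟩)
        · exact Or.inl hx
        · exact Or.inr ⟨y, Or.inl rfl, h, hx⟩
        · exact Or.inr ⟨i, Or.inr hi, hc, hx⟩
      · rintro (hx | ⟨i, (rfl | hi), hc, hx⟩)
        · exact Or.inl (Or.inl hx)
        · exact Or.inl (Or.inr hx)
        · exact Or.inr ⟨i, hi, hc, hx⟩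
    · simp only [h, List.mem_cons, Bool.false_eq_true]
      constructor
      · rintro (hx | ⟨i, hi, hc, hx⟩)
        · exact Or.inl hx
        · exact Or.inr ⟨i, Or.inr hi, hc, hx⟩
      · rintro (hx | ⟨i, (rfl | hi), hc, hx⟩)
        · exact Or.inl hx
        · exact absurd hc h
        · exact Or.inr ⟨i, hi, hc, hx⟩

-- membership in an accumulating outer foldl, given a characterization of each step
theorem mem_foldl_outer {α β : Type} (l : List α) (F : PySem.Set β → α → PySem.Set β)
    (P : α → β → Prop)
    (hF : ∀ acc s x, x ∈ F acc s ↔ x ∈ acc ∨ P s x) (acc : PySem.Set β) (x : β) :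
    x ∈ l.foldl F acc ↔ x ∈ acc ∨ ∃ s ∈ l, P s x := by
  induction l generalizing acc with
  | nil => simp
  | cons s ss ih =>
    simp only [List.foldl_cons, ih, hF, List.mem_cons]
    constructor
    · rintro ((hx | hx) | ⟨t, ht, hp⟩)
      · exact Or.inl hx
      · exact Or.inr ⟨s, Or.inl rfl, hx⟩
      · exact Or.inr ⟨t, Or.inr ht, hp⟩
    · rintro (hx | ⟨t, (rfl | ht), hp⟩)
      · exact Or.inl (Or.inl hx)
      · exact Or.inl (Or.inr hp)
      · exact Or.inr ⟨t, ht, hp⟩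

theorem mem_babs (outside : List String) (x : List Char) :
    (x ∈ outside.foldl (fun acc s =>
      (List.range (s.toList.length - 2)).foldl (fun acc2 i =>
        if s.toList.getD i ' ' == s.toList.getD (i + 2) ' ' && s.toList.getD i ' ' != s.toList.getD (i + 1) ' ' then
          PySem.Set.add acc2 [s.toList.getD (i + 1) ' ', s.toList.getD i ' ', s.toList.getD (i + 1) ' ']
        else acc2) acc) PySem.Set.empty) ↔
      ∃ s ∈ outside, ∃ i ∈ List.range (s.toList.length - 2),
        (s.toList.getD i ' ' == s.toList.getD (i + 2) ' ' &&
         s.toList.getD i ' ' != s.toList.getD (i + 1) ' ') = true ∧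
        x = [s.toList.getD (i + 1) ' ', s.toList.getD i ' ', s.toList.getD (i + 1) ' '] := by
  rw [mem_foldl_outer _ _
    (fun s x => ∃ i ∈ List.range (s.toList.length - 2),
        (s.toList.getD i ' ' == s.toList.getD (i + 2) ' ' &&
         s.toList.getD i ' ' != s.toList.getD (i + 1) ' ') = true ∧
        x = [s.toList.getD (i + 1) ' ', s.toList.getD i ' ', s.toList.getD (i + 1) ' '])
    (fun acc s y => by
      simpa using mem_foldl_setAdd_if (List.range (s.toList.length - 2))
        (fun i => s.toList.getD i ' ' == s.toList.getD (i + 2) ' ' &&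
                  s.toList.getD i ' ' != s.toList.getD (i + 1) ' ')
        (fun i => [s.toList.getD (i + 1) ' ', s.toList.getD i ' ', s.toList.getD (i + 1) ' '])
        acc y)]
  simp [PySem.Set.empty]

theorem mem_windows (hypernet : List String) (x : List Char) :
    (x ∈ hypernet.foldl (fun acc h =>
      (List.range (h.toList.length - 2)).foldl (fun acc2 j =>
        PySem.Set.add acc2 ((h.toList.drop j).take 3)) acc) PySem.Set.empty) ↔
      ∃ h ∈ hypernet, ∃ j ∈ List.range (h.toList.length - 2),
        x = (h.toList.drop j).take 3 := by
  rw [mem_foldl_outer _ _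
    (fun h x => ∃ j ∈ List.range (h.toList.length - 2), x = (h.toList.drop j).take 3)
    (fun acc h y => by
      simpa using mem_foldl_setAdd_if (List.range (h.toList.length - 2))
        (fun _ => true) (fun j => (h.toList.drop j).take 3) acc y)]
  simp [PySem.Set.empty]

-- a length-3 list is an infix iff it is one of the length-3 windows
theorem infix_iff_window (t hs : List Char) (ht : t.length = 3) :
    t <:+: hs ↔ ∃ j ∈ List.range (hs.length - 2), (hs.drop j).take 3 = t := by
  constructor
  · rintro ⟨pre, suf, rfl⟩
    refine ⟨pre.length, ?_, ?_⟩
    · simp [List.mem_range]; omega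
    · rw [show pre ++ t ++ suf = pre ++ (t ++ suf) by simp, List.drop_left, ← ht,
        List.take_left]
  · rintro ⟨j, _, rfl⟩
    exact ((hs.drop j).take_prefix 3).isInfix.trans (hs.drop_suffix j).isInfix

theorem bab_infix (a b : Char) (hs : List Char) :
    [b, a, b] <:+: hs ↔ ∃ j ∈ List.range (hs.length - 2), (hs.drop j).take 3 = [b, a, b] :=
  infix_iff_window _ _ rfl

-- ===== VERDICT (by name: the statement is the Claim_ definition above) =====
theorem find_aba_spec : Claim_equal_find_aba := by
  intro outside hypernet _
  show find_aba outside hypernet = find_aba_alt outside hypernet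
  rw [Bool.eq_iff_iff]
  simp only [find_aba, find_aba_alt, List.any_eq_true, List.mem_range, Bool.not_eq_eq_eq_not,
    Bool.not_true, Bool.eq_false_iff, Ne, PySem.Set.isdisjoint_iff]
  push Not
  simp only [mem_babs, mem_windows]
  constructor
  · rintro ⟨s, hs, i, hi, hc⟩
    split_ifs at hc with hcond
    · simp only [List.any_eq_true, PySem.Chars.isIn_iff_infix, bab_infix, List.mem_range] at hc
      obtain ⟨h, hh, j, hj, hw⟩ := hc
      exact ⟨_, ⟨s, hs, i, List.mem_range.mpr hi, hcond, rfl⟩, h, hh, j, List.mem_range.mpr hj, hw.symm⟩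
  · rintro ⟨x, ⟨s, hs, i, hi, hcond, rfl⟩, h, hh, j, hj, hw⟩
    refine ⟨s, hs, i, List.mem_range.mp hi, ?_⟩
    rw [if_pos hcond]
    simp only [List.any_eq_true, PySem.Chars.isIn_iff_infix, bab_infix, List.mem_range]
    exact ⟨h, hh, j, List.mem_range.mp hj, hw.symm⟩
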